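-- pv_equiv track=rewrite | github.com/shreya-03/Sherlock | conversations.py | cluster_users_msgs
-- ===== SOURCE A (Python) =====
-- from collections import OrderedDict,Counter
--
-- def cluster_users_msgs(chats_info):
-- 	user_msgs = OrderedDict()
-- 	for i in range(len(chats_info)):
-- 		if chats_info[i]['user'] not in user_msgs.keys():
-- 			user_msgs[chats_info[i]['user']] = ''
-- 			user_msgs[chats_info[i]['user']] += chats_info[i]['msgs'] + ' '
-- 		else:
-- 			user_msgs[chats_info[i]['user']] += chats_info[i]['msgs'] + ' '
-- 	return user_msgs
-- ===== SOURCE B (Python) =====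
-- from collections import OrderedDict
--
-- def cluster_users_msgs(chats_info):
--     # pass 1: group each user's messages (first-seen order) into lists
--     groups = OrderedDict()
--     for chat in chats_info:
--         groups.setdefault(chat['user'], []).append(chat['msgs'])
--     # pass 2: join each user's messages, one trailing space per message
--     res = OrderedDict()
--     for user, msgs in groups.items():
--         res[user] = ''.join(m + ' ' for m in msgs)
--     return res
-- ===== Notes on version B (the rewrite author's own statement) =====
-- stated objective: alternative
-- what changed: Instead of A's single loop that repeatedly re-concatenates strings inside an OrderedDict, B first groups each user's messages into lists in one pass and then joins each list into the final string in a second pass.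
import Mathlib
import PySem

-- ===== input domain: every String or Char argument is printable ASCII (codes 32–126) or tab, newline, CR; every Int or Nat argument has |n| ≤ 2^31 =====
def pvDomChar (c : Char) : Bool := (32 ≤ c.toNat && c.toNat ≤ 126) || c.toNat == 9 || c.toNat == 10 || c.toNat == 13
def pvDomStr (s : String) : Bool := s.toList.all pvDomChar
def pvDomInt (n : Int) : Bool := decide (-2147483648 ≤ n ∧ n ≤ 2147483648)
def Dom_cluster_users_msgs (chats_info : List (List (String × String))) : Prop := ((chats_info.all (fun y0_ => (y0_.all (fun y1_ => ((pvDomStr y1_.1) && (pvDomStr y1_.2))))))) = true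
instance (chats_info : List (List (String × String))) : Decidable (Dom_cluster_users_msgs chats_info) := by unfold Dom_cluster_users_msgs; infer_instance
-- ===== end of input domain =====

-- B groups each user's messages into lists in one pass and joins them in a second pass,
-- instead of A's repeated string concatenation inside the dict (objective: alternative decomposition).

-- chat[k] on the dict chat (Pre_ guarantees the key is present; Python raises KeyError otherwise)
def pvChatGet (chat : List (String × String)) (k : String) : String :=
  ((PySem.Dict.ofList chat).get? k).getD ""

-- ===== PORT A =====
-- loop body of A: if user not seen, set '' then += msgs + ' '; else += msgs + ' '
def pvStepA (d : PySem.Dict String String) (chat : List (String × String)) : PySem.Dict String String :=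
  let u := pvChatGet chat "user"
  let m := pvChatGet chat "msgs"
  if d.contains u = false then
    let d1 := d.insert u ""
    d1.insert u (d1.getD u "" ++ (m ++ " "))
  else
    d.insert u (d.getD u "" ++ (m ++ " "))

def cluster_users_msgs (chats_info : List (List (String × String))) : List (String × String) :=
  (chats_info.foldl pvStepA PySem.Dict.empty).items

-- ===== PORT B =====
-- pass 1 body: groups.setdefault(chat['user'], []).append(chat['msgs'])
def pvStepB (g : PySem.Dict String (List String)) (chat : List (String × String)) :
    PySem.Dict String (List String) :=
  g.modify (pvChatGet chat "user") [] (fun l => l ++ [pvChatGet chat "msgs"])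

-- ''.join(m + ' ' for m in msgs)
def pvJoinSp (msgs : List String) : String := String.join (msgs.map (fun m => m ++ " "))

def cluster_users_msgs_alt (chats_info : List (List (String × String))) : List (String × String) :=
  let groups := chats_info.foldl pvStepB PySem.Dict.empty
  (groups.items.foldl (fun r p => r.insert p.1 (pvJoinSp p.2)) PySem.Dict.empty).items

-- ===== PRECONDITION & SPEC =====
-- Pre_ excludes exactly the inputs where Python A raises KeyError: some chat lacks a 'user' or 'msgs' key.
def Pre_cluster_users_msgs (chats_info : List (List (String × String))) : Prop :=
  ∀ chat ∈ chats_info, "user" ∈ chat.map Prod.fst ∧ "msgs" ∈ chat.map Prod.fst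
instance (chats_info : List (List (String × String))) : Decidable (Pre_cluster_users_msgs chats_info) := by
  unfold Pre_cluster_users_msgs; infer_instance

def pvWitness_cluster_users_msgs : (List (List (String × String))) :=
  [[("user", "alice"), ("msgs", "hi")], [("user", "bob"), ("msgs", "yo")], [("user", "alice"), ("msgs", "again")]]

def Spec_cluster_users_msgs (chats_info : List (List (String × String))) (out : List (String × String)) : Prop := out = cluster_users_msgs_alt chats_info
instance (chats_info : List (List (String × String))) (out : List (String × String)) : Decidable (Spec_cluster_users_msgs chats_info out) := by unfold Spec_cluster_users_msgs; infer_instance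

-- ===== CLAIM (what is proved, stated in full; the proofs are below) =====
def Claim_equal_cluster_users_msgs : Prop := ∀ (chats_info : List (List (String × String))), Dom_cluster_users_msgs chats_info → Pre_cluster_users_msgs chats_info → Spec_cluster_users_msgs chats_info (cluster_users_msgs chats_info)

-- ===== LEMMAS AND PROOFS =====

lemma pvJoinSp_append (l : List String) (m : String) :
    pvJoinSp (l ++ [m]) = pvJoinSp l ++ (m ++ " ") := by
  simp [pvJoinSp, String.join, List.map_append, List.foldl_append]

-- the invariant: A's running dict is B's running group dict with each list joined
lemma pv_inv (l : List (List (String × String)))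
    (dA : PySem.Dict String String) (dB : PySem.Dict String (List String))
    (hnd : dB.keys.Nodup)
    (h : dA.items = dB.items.map (fun p => (p.1, pvJoinSp p.2))) :
    (l.foldl pvStepA dA).items
      = (l.foldl pvStepB dB).items.map (fun p => (p.1, pvJoinSp p.2)) := by
  induction l generalizing dA dB with
  | nil => simpa using h
  | cons chat rest ih =>
    have hkeys : dA.keys = dB.keys := by
      show dA.items.map Prod.fst = dB.items.map Prod.fst
      rw [h, List.map_map]; rfl
    have hndA : dA.keys.Nodup := hkeys ▸ hnd
    set u := pvChatGet chat "user" with hu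
    set m := pvChatGet chat "msgs" with hm
    have hcont : dA.contains u = dB.contains u := by
      rw [PySem.Dict.contains_eq_decide_mem_keys, PySem.Dict.contains_eq_decide_mem_keys, hkeys]
    simp only [List.foldl_cons]
    by_cases hc : dB.contains u = true
    · -- user already present
      have hcA : dA.contains u = true := by rw [hcont]; exact hc
      obtain ⟨lm, hget⟩ : ∃ lm, dB.get? u = some lm := by
        have := PySem.Dict.contains_eq_isSome_get? (d := dB) (k := u)
        rw [hc] at this
        exact Option.isSome_iff_exists.mp this.symm
      have hmemB : (u, lm) ∈ dB.items := PySem.Dict.mem_items_of_get?_eq_some dB hget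
      have hgetDB : dB.getD u [] = lm := PySem.Dict.getD_of_get?_eq_some dB [] hget
      have hmemA : (u, pvJoinSp lm) ∈ dA.items := by
        rw [h]; exact List.mem_map.mpr ⟨(u, lm), hmemB, rfl⟩
      have hgetDA : dA.getD u "" = pvJoinSp lm := PySem.Dict.getD_of_mem_items dA hmemA hndA ""
      have hstepA : pvStepA dA chat = dA.insert u (pvJoinSp lm ++ (m ++ " ")) := by
        simp [pvStepA, ← hu, ← hm, hcA, hgetDA]
      have hstepB : pvStepB dB chat = dB.insert u (lm ++ [m]) := by
        show dB.insert u ((dB.getD u []) ++ [m]) = _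
        rw [hgetDB]
      rw [hstepA, hstepB]
      refine ih _ _ (PySem.Dict.nodup_keys_insert dB u (lm ++ [m]) hnd) ?_
      rw [PySem.Dict.items_insert_of_contains dA _ hcA,
          PySem.Dict.items_insert_of_contains dB _ hc, h, List.map_map, List.map_map]
      refine List.map_congr_left (fun p _ => ?_)
      by_cases hp : p.1 = u
      · simp [Function.comp, hp, pvJoinSp_append]
      · simp [Function.comp, hp]
    · -- new user
      have hc' : dB.contains u = false := by
        cases hcb : dB.contains u with
        | true => exact absurd hcb hc
        | false => rfl
      have hcA : dA.contains u = false := by rw [hcont]; exact hc'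
      have hstepA : pvStepA dA chat = dA.insert u ("" ++ (m ++ " ")) := by
        simp [pvStepA, ← hu, ← hm, hcA, PySem.Dict.getD_insert_self, PySem.Dict.insert_insert_self]
      have hstepB : pvStepB dB chat = dB.insert u [m] := by
        show dB.insert u ((dB.getD u []) ++ [m]) = _
        rw [PySem.Dict.getD_of_not_contains dB [] hc']
        rfl
      rw [hstepA, hstepB]
      refine ih _ _ (PySem.Dict.nodup_keys_insert dB u [m] hnd) ?_
      rw [PySem.Dict.items_insert_of_not_contains dA _ hcA,
          PySem.Dict.items_insert_of_not_contains dB _ hc', List.map_append, h]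
      simp [pvJoinSp, String.join]

lemma pv_groups_keys_nodup (chats_info : List (List (String × String))) :
    (chats_info.foldl pvStepB PySem.Dict.empty).keys.Nodup := by
  have := PySem.Dict.nodup_keys_foldl_modify_key chats_info
      (fun chat => pvChatGet chat "user") ([] : List String)
      (fun _ chat => fun l => l ++ [pvChatGet chat "msgs"])
      PySem.Dict.empty (by simp)
  simpa [pvStepB] using this

-- ===== VERDICT (by name: the statement is the Claim_ definition above) =====
theorem cluster_users_msgs_spec : Claim_equal_cluster_users_msgs := by
  intro chats_info _ _
  show cluster_users_msgs chats_info = cluster_users_msgs_alt chats_info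
  unfold cluster_users_msgs cluster_users_msgs_alt
  have hnd := pv_groups_keys_nodup chats_info
  rw [PySem.Dict.items_foldl_insert_fresh
        ((chats_info.foldl pvStepB PySem.Dict.empty).items) Prod.fst
        (fun p => pvJoinSp p.2) PySem.Dict.empty
        (fun a _ => PySem.Dict.contains_empty _) hnd]
  simpa using pv_inv chats_info PySem.Dict.empty PySem.Dict.empty PySem.Dict.nodup_keys_empty rfl
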